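-- pv_equiv track=rewrite | github.com/techgirlwhiz-cell/MP_Mail_Threat_Analyzer | metadata_analyzer.py | _extract_header_features
-- ===== SOURCE A (Python) =====
-- def _extract_header_features(headers):
--     """Extract features from email headers."""
--     features = {
--         'has_spf': 0,
--         'has_dkim': 0,
--         'has_dmarc': 0,
--         'has_mime_version': 0,
--         'has_content_type': 0,
--         'num_headers': 0,
--     }
--
--     if not headers:
--         return features
--
--     header_keys = [k.lower() for k in headers.keys()] if isinstance(headers, dict) else []
--
--     # Security headers
--     features['has_spf'] = 1 if any('spf' in k for k in header_keys) else 0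
--     features['has_dkim'] = 1 if any('dkim' in k for k in header_keys) else 0
--     features['has_dmarc'] = 1 if any('dmarc' in k for k in header_keys) else 0
--
--     # Content headers
--     features['has_mime_version'] = 1 if any('mime-version' in k for k in header_keys) else 0
--     features['has_content_type'] = 1 if any('content-type' in k for k in header_keys) else 0
--
--     # Header count
--     features['num_headers'] = len(header_keys)
--
--     return features
-- ===== SOURCE B (Python) =====
-- def _extract_header_features(headers):
--     """Extract features from email headers (single pass over the keys)."""
--     spf = dkim = dmarc = mime = ctype = n = 0
--     if headers and isinstance(headers, dict):
--         for key in headers.keys():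
--             k = key.lower()
--             if 'spf' in k:
--                 spf = 1
--             if 'dkim' in k:
--                 dkim = 1
--             if 'dmarc' in k:
--                 dmarc = 1
--             if 'mime-version' in k:
--                 mime = 1
--             if 'content-type' in k:
--                 ctype = 1
--             n += 1
--     return {
--         'has_spf': spf,
--         'has_dkim': dkim,
--         'has_dmarc': dmarc,
--         'has_mime_version': mime,
--         'has_content_type': ctype,
--         'num_headers': n,
--     }
-- ===== Notes on version B (the rewrite author's own statement) =====
-- stated objective: simpler
-- what changed: Replaces the zero-initialized dict plus five separate any()-scans over the key list with one accumulator loop that walks the keys once, setting each flag and counting as it goes, then builds the result dict at the end.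
import Mathlib
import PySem

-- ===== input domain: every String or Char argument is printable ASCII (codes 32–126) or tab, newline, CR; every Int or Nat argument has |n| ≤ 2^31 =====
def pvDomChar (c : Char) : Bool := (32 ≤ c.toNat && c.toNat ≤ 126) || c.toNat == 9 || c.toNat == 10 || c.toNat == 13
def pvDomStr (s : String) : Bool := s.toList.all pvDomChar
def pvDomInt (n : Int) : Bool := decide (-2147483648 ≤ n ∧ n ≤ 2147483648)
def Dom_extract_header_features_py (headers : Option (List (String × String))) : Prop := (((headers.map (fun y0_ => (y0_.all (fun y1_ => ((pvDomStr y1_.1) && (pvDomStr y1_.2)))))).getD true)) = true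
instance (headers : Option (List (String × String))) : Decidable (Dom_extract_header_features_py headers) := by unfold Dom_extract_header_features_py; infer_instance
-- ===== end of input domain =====

-- B restructures A as a single accumulator loop over the keys (objective: simpler decomposition; same cost class).

-- ===== PORT A =====
-- the zero-initialized features dict A builds first (insertion order of the six keys)
def pvZeroFeatures : List (String × Int) :=
  [("has_spf", 0), ("has_dkim", 0), ("has_dmarc", 0),
   ("has_mime_version", 0), ("has_content_type", 0), ("num_headers", 0)]

def extract_header_features_py (headers : Option (List (String × String))) : List (String × Int) :=
  match headers with
  | none => pvZeroFeatures
  | some hs =>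
    if hs = [] then pvZeroFeatures  -- 'if not headers' on an empty dict
    else
      -- header_keys = [k.lower() for k in headers.keys()]  (dict keys: first occurrences, in order)
      let header_keys := (PySem.List.dedup (hs.map Prod.fst)).map PySem.Str.lower
      [("has_spf", if header_keys.any (fun k => PySem.Str.isIn "spf" k) then 1 else 0),
       ("has_dkim", if header_keys.any (fun k => PySem.Str.isIn "dkim" k) then 1 else 0),
       ("has_dmarc", if header_keys.any (fun k => PySem.Str.isIn "dmarc" k) then 1 else 0),
       ("has_mime_version", if header_keys.any (fun k => PySem.Str.isIn "mime-version" k) then 1 else 0),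
       ("has_content_type", if header_keys.any (fun k => PySem.Str.isIn "content-type" k) then 1 else 0),
       ("num_headers", (header_keys.length : Int))]

-- ===== PORT B =====
-- one loop step: lower the key, set each flag, count
def pvStepB (st : Int × Int × Int × Int × Int × Int) (key : String) : Int × Int × Int × Int × Int × Int :=
  let k := PySem.Str.lower key
  ((if PySem.Str.isIn "spf" k then 1 else st.1),
   (if PySem.Str.isIn "dkim" k then 1 else st.2.1),
   (if PySem.Str.isIn "dmarc" k then 1 else st.2.2.1),
   (if PySem.Str.isIn "mime-version" k then 1 else st.2.2.2.1),
   (if PySem.Str.isIn "content-type" k then 1 else st.2.2.2.2.1),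
   st.2.2.2.2.2 + 1)

def extract_header_features_py_alt (headers : Option (List (String × String))) : List (String × Int) :=
  let keys : List String :=
    match headers with
    | none => []
    | some hs => PySem.List.dedup (hs.map Prod.fst)   -- dict keys; empty dict loops zero times
  let st := keys.foldl pvStepB (0, 0, 0, 0, 0, 0)
  [("has_spf", st.1), ("has_dkim", st.2.1), ("has_dmarc", st.2.2.1),
   ("has_mime_version", st.2.2.2.1), ("has_content_type", st.2.2.2.2.1),
   ("num_headers", st.2.2.2.2.2)]

-- ===== PRECONDITION & SPEC =====
def Spec_extract_header_features_py (headers : Option (List (String × String))) (out : List (String × Int)) : Prop := out = extract_header_features_py_alt headers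
instance (headers : Option (List (String × String))) (out : List (String × Int)) : Decidable (Spec_extract_header_features_py headers out) := by unfold Spec_extract_header_features_py; infer_instance

-- ===== CLAIM (what is proved, stated in full; the proofs are below) =====
def Claim_equal_extract_header_features_py : Prop := ∀ (headers : Option (List (String × String))), Dom_extract_header_features_py headers → Spec_extract_header_features_py headers (extract_header_features_py headers)

-- ===== LEMMAS AND PROOFS =====

-- flag update: setting-a-flag-then-maybe-again equals one disjunction test
theorem pvIfOr (A B : Bool) (a : Int) :
    (if A = true then (1 : Int) else if B = true then 1 else a) = if (B || A) = true then 1 else a := by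
  cases A <;> cases B <;> simp

-- the B fold, from ANY accumulator, computes A's five any-scans (or keeps the flag) and adds the length
theorem pvFoldB_char (l : List String) (a b c d e n : Int) :
    l.foldl pvStepB (a, b, c, d, e, n) =
      ((if l.any (fun k => PySem.Str.isIn "spf" (PySem.Str.lower k)) then 1 else a),
       (if l.any (fun k => PySem.Str.isIn "dkim" (PySem.Str.lower k)) then 1 else b),
       (if l.any (fun k => PySem.Str.isIn "dmarc" (PySem.Str.lower k)) then 1 else c),
       (if l.any (fun k => PySem.Str.isIn "mime-version" (PySem.Str.lower k)) then 1 else d),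
       (if l.any (fun k => PySem.Str.isIn "content-type" (PySem.Str.lower k)) then 1 else e),
       n + l.length) := by
  induction l generalizing a b c d e n with
  | nil => simp
  | cons x xs ih =>
    simp only [List.foldl_cons, List.any_cons, pvStepB, List.length_cons]
    rw [ih]
    simp only [Prod.mk.injEq]
    refine ⟨pvIfOr _ _ _, pvIfOr _ _ _, pvIfOr _ _ _, pvIfOr _ _ _, pvIfOr _ _ _, ?_⟩
    push_cast; ring

-- ===== VERDICT (by name: the statement is the Claim_ definition above) =====
theorem extract_header_features_py_spec : Claim_equal_extract_header_features_py := by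
  intro headers _
  unfold Spec_extract_header_features_py extract_header_features_py extract_header_features_py_alt
  match headers with
  | none => simp [pvZeroFeatures]
  | some hs =>
    by_cases h : hs = []
    · simp [h, pvZeroFeatures, PySem.List.dedup]
    · simp only [h, if_false]
      rw [pvFoldB_char]
      simp only [List.any_map, Function.comp_def, zero_add, List.length_map]
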